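-- pv_equiv track=rewrite | github.com/Enjef/Algo | 1100 - 1199/1138 - Alphabet Board Path/1138 - Alphabet Board Path.py | alphabetBoardPath_best_memory
-- ===== SOURCE A (Python) =====
-- def alphabetBoardPath_best_memory(target: str) -> str:
--     board = ['abcde', 'fghij', 'klmno', 'pqrst', 'uvwxy', 'z']
--     position = {}
--     for r in range(5):
--         for c in range(5):
--             position[board[r][c]] = (r, c)
--     position[board[5][0]] = (5, 0)
--
--     start = (0, 0)
--     res = ''
--     for letter in target:
--         end = position[letter]
--         x, y = end[0] - start[0], end[1] - start[1]
--         dir1 = 'D' if x >= 0 else 'U'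
--         dir2 = 'R' if y >= 0 else 'L'
--         if letter == 'z':
--             res += dir2 * abs(y) + dir1 * abs(x) + '!'
--         else:
--             res += dir1 * abs(x) + dir2 * abs(y) + '!'
--         start = end
--     return res
-- ===== SOURCE B (Python) =====
-- def alphabetBoardPath_best_memory(target: str) -> str:
--     # Unit-step simulation instead of run-length string arithmetic: a recursive
--     # walker emits ONE move per call, stepping cell by cell toward the letter,
--     # vertical-first in general but horizontal-first when heading to 'z'.
--     def walk(r, c, tr, tc, horiz_first):
--         if (r, c) == (tr, tc):
--             return '!'
--         if not horiz_first and r != tr: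
--             return ('D' if tr > r else 'U') + walk(r + (1 if tr > r else -1), c, tr, tc, horiz_first)
--         if c != tc:
--             return ('R' if tc > c else 'L') + walk(r, c + (1 if tc > c else -1), tr, tc, horiz_first)
--         return ('D' if tr > r else 'U') + walk(r + (1 if tr > r else -1), c, tr, tc, horiz_first)
--
--     pieces = []
--     r = c = 0
--     for ch in target:
--         tr, tc = divmod(ord(ch) - 97, 5)
--         pieces.append(walk(r, c, tr, tc, ch == 'z'))
--         r, c = tr, tc
--     return ''.join(pieces)
-- ===== Notes on version B (the rewrite author's own statement) =====
-- stated objective: alternative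
-- what changed: Replaces A's board-table/dict lookup and run-length string multiplication (dir * abs(delta)) by a closed-form divmod coordinate and a recursive unit-step walker that simulates the path one cell per call, emitting single moves until it reaches each letter.
import Mathlib
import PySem

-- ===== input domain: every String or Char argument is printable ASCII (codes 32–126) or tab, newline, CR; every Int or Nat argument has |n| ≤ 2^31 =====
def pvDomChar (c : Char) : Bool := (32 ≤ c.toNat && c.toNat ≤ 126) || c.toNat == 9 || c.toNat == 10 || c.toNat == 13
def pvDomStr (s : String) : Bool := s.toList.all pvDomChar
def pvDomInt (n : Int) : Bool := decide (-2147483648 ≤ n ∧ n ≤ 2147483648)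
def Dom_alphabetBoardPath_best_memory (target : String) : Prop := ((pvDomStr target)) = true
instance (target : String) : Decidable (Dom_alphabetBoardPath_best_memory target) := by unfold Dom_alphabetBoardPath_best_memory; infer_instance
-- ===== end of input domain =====

-- B replaces A's board-table/dict lookups and run-length string multiplication by a
-- recursive unit-step walker that simulates the path one cell at a time (alternative).

-- ===== PORT A =====
def pvBoard : List String := ["abcde", "fghij", "klmno", "pqrst", "uvwxy", "z"]

-- position = {}; for r in range(5): for c in range(5): position[board[r][c]] = (r, c); position[board[5][0]] = (5, 0)
def pvPosition : PySem.Dict Char (Int × Int) :=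
  let d := (PySem.List.pyRange 0 5 1).foldl (fun d r =>
    (PySem.List.pyRange 0 5 1).foldl (fun d c =>
      match PySem.Str.pyGet? ((PySem.List.pyGet? pvBoard r).getD "") c with
      | some ch => d.insert ch (r, c)
      | none => d) d) PySem.Dict.empty
  match PySem.Str.pyGet? ((PySem.List.pyGet? pvBoard 5).getD "") 0 with
  | some ch => d.insert ch (5, 0)
  | none => d

def alphabetBoardPath_best_memory (target : String) : String :=
  -- the .getD (0,0) is exact only under Pre_ (a missing key is a KeyError in Python)
  let res := target.toList.foldl (fun (st : (Int × Int) × List Char) letter =>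
    let start := st.1
    let e := (pvPosition.get? letter).getD (0, 0)
    let x := e.1 - start.1
    let y := e.2 - start.2
    let dir1 := if x ≥ 0 then 'D' else 'U'
    let dir2 := if y ≥ 0 then 'R' else 'L'
    let seg := if letter = 'z' then
        PySem.List.pyRepeat [dir2] |y| ++ PySem.List.pyRepeat [dir1] |x| ++ ['!']
      else
        PySem.List.pyRepeat [dir1] |x| ++ PySem.List.pyRepeat [dir2] |y| ++ ['!']
    (e, st.2 ++ seg)) ((0, 0), [])
  String.ofList res.2

-- ===== PORT B =====
-- divmod(ord(ch) - 97, 5)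
def pvCoord (ch : Char) : Int × Int :=
  (PySem.Int.floordiv ((ch.toNat : Int) - 97) 5, PySem.Int.mod ((ch.toNat : Int) - 97) 5)

-- the recursive unit-step walker of Source B, one emitted move per call; the Nat
-- counter is exactly the remaining cell distance and only makes the same
-- recursion structural (each call decreases it by 1; it never alters a result)
def pvWalkGo : Nat → Int → Int → Int → Int → Bool → List Char
  | 0, _, _, _, _, _ => ['!']
  | fuel + 1, r, c, tr, tc, z =>
    if r = tr ∧ c = tc then ['!']
    else if z = false ∧ r ≠ tr then
      (if tr > r then 'D' else 'U') :: pvWalkGo fuel (if tr > r then r + 1 else r - 1) c tr tc z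
    else if c ≠ tc then
      (if tc > c then 'R' else 'L') :: pvWalkGo fuel r (if tc > c then c + 1 else c - 1) tr tc z
    else
      (if tr > r then 'D' else 'U') :: pvWalkGo fuel (if tr > r then r + 1 else r - 1) c tr tc z

def pvWalk (r c tr tc : Int) (z : Bool) : List Char :=
  pvWalkGo ((tr - r).natAbs + (tc - c).natAbs) r c tr tc z

def alphabetBoardPath_best_memory_alt (target : String) : String :=
  let st := target.toList.foldl (fun (st : (Int × Int) × List (List Char)) ch =>
    let t := pvCoord ch
    (t, st.2 ++ [pvWalk st.1.1 st.1.2 t.1 t.2 (ch == 'z')])) ((0, 0), [])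
  String.ofList st.2.flatten

-- ===== PRECONDITION & SPEC =====
-- Pre_ excludes targets with characters other than lowercase a–z: on those Python A raises KeyError.
def Pre_alphabetBoardPath_best_memory (target : String) : Prop :=
  (target.toList.all (fun c => c ∈ "abcdefghijklmnopqrstuvwxyz".toList)) = true
instance (target : String) : Decidable (Pre_alphabetBoardPath_best_memory target) := by
  unfold Pre_alphabetBoardPath_best_memory; infer_instance
def pvWitness_alphabetBoardPath_best_memory : String := "zdz"

def Spec_alphabetBoardPath_best_memory (target : String) (out : String) : Prop := out = alphabetBoardPath_best_memory_alt target
instance (target : String) (out : String) : Decidable (Spec_alphabetBoardPath_best_memory target out) := by unfold Spec_alphabetBoardPath_best_memory; infer_instance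

-- ===== CLAIM (what is proved, stated in full; the proofs are below) =====
def Claim_equal_alphabetBoardPath_best_memory : Prop := ∀ (target : String), Dom_alphabetBoardPath_best_memory target → Pre_alphabetBoardPath_best_memory target → Spec_alphabetBoardPath_best_memory target (alphabetBoardPath_best_memory target)

-- ===== LEMMAS AND PROOFS =====

-- the dict A builds agrees with B's closed-form coordinate on every lowercase letter
theorem pvPositionAll :
    ("abcdefghijklmnopqrstuvwxyz".toList.all
      (fun c => pvPosition.get? c == some (pvCoord c))) = true := by
  decide

theorem pvPosition_eq_coord :
    ∀ c ∈ "abcdefghijklmnopqrstuvwxyz".toList, pvPosition.get? c = some (pvCoord c) := by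
  intro c hc
  exact eq_of_beq (List.all_eq_true.mp pvPositionAll c hc)

-- absorbing one unit step into the run-length block (positive direction)
theorem pvRun_succ (posC negC : Char) (a b : Int) (h : b > a) (tail : List Char) :
    posC :: (PySem.List.pyRepeat [if b - (a + 1) ≥ 0 then posC else negC] |b - (a + 1)| ++ tail) =
    PySem.List.pyRepeat [posC] |b - a| ++ tail := by
  have h2 : b - (a + 1) ≥ 0 := by omega
  rw [if_pos h2, PySem.List.pyRepeat_singleton, PySem.List.pyRepeat_singleton]
  have he : |b - a|.toNat = |b - (a + 1)|.toNat + 1 := by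
    rw [abs_of_nonneg (by omega : (0:Int) ≤ b - a), abs_of_nonneg h2]
    omega
  rw [he, List.replicate_succ]
  simp

-- absorbing one unit step into the run-length block (negative direction)
theorem pvRun_pred (posC negC : Char) (a b : Int) (h : b < a) (tail : List Char) :
    negC :: (PySem.List.pyRepeat [if b - (a - 1) ≥ 0 then posC else negC] |b - (a - 1)| ++ tail) =
    PySem.List.pyRepeat [negC] |b - a| ++ tail := by
  rw [PySem.List.pyRepeat_singleton, PySem.List.pyRepeat_singleton]
  by_cases h0 : b - (a - 1) ≥ 0
  · have e0 : |b - (a - 1)|.toNat = 0 := by rw [abs_of_nonneg h0]; omega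
    have e1 : |b - a|.toNat = 1 := by rw [abs_of_nonpos (by omega : b - a ≤ 0)]; omega
    simp [e0, e1]
  · have he : |b - a|.toNat = |b - (a - 1)|.toNat + 1 := by
      rw [abs_of_nonpos (by omega : b - a ≤ 0), abs_of_nonpos (by omega : b - (a - 1) ≤ 0)]
      omega
    rw [if_neg h0, he, List.replicate_succ]
    simp

-- walker with matching rows: emits the horizontal run then '!'
theorem pvGo_row : ∀ (fuel : Nat) (c tr tc : Int) (z : Bool), fuel = (tc - c).natAbs →
    pvWalkGo fuel tr c tr tc z =
      PySem.List.pyRepeat [if tc - c ≥ 0 then 'R' else 'L'] |tc - c| ++ ['!'] := by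
  intro fuel
  induction fuel with
  | zero =>
    intro c tr tc z h
    have hc : c = tc := by omega
    simp [pvWalkGo, hc, PySem.List.pyRepeat_singleton]
  | succ n ih =>
    intro c tr tc z h
    have hne : c ≠ tc := by omega
    rw [show pvWalkGo (n + 1) tr c tr tc z =
        (if tc > c then 'R' else 'L') :: pvWalkGo n tr (if tc > c then c + 1 else c - 1) tr tc z by
      simp [pvWalkGo, hne]]
    by_cases hlt : tc > c
    · simp only [if_pos hlt]
      rw [ih (c + 1) tr tc z (by omega)]
      rw [if_pos (by omega : tc - c ≥ 0)]
      exact pvRun_succ 'R' 'L' c tc hlt ['!']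
    · have hlt' : tc < c := by omega
      simp only [if_neg hlt]
      rw [ih (c - 1) tr tc z (by omega)]
      rw [if_neg (by omega : ¬ tc - c ≥ 0)]
      exact pvRun_pred 'R' 'L' c tc hlt' ['!']

-- walker with matching columns: emits the vertical run then '!'
theorem pvGo_col : ∀ (fuel : Nat) (r tr tc : Int) (z : Bool), fuel = (tr - r).natAbs →
    pvWalkGo fuel r tc tr tc z =
      PySem.List.pyRepeat [if tr - r ≥ 0 then 'D' else 'U'] |tr - r| ++ ['!'] := by
  intro fuel
  induction fuel with
  | zero =>
    intro r tr tc z h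
    have hr : r = tr := by omega
    simp [pvWalkGo, hr, PySem.List.pyRepeat_singleton]
  | succ n ih =>
    intro r tr tc z h
    have hne : r ≠ tr := by omega
    rw [show pvWalkGo (n + 1) r tc tr tc z =
        (if tr > r then 'D' else 'U') :: pvWalkGo n (if tr > r then r + 1 else r - 1) tc tr tc z by
      by_cases hz : z = false <;> simp [pvWalkGo, hne, hz]]
    by_cases hlt : tr > r
    · simp only [if_pos hlt]
      rw [ih (r + 1) tr tc z (by omega)]
      rw [if_pos (by omega : tr - r ≥ 0)]
      exact pvRun_succ 'D' 'U' r tr hlt ['!']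
    · have hlt' : tr < r := by omega
      simp only [if_neg hlt]
      rw [ih (r - 1) tr tc z (by omega)]
      rw [if_neg (by omega : ¬ tr - r ≥ 0)]
      exact pvRun_pred 'D' 'U' r tr hlt' ['!']

-- non-'z' walk = vertical run ++ horizontal run ++ '!'
theorem pvGo_false : ∀ (fuel : Nat) (r c tr tc : Int),
    fuel = (tr - r).natAbs + (tc - c).natAbs →
    pvWalkGo fuel r c tr tc false =
      PySem.List.pyRepeat [if tr - r ≥ 0 then 'D' else 'U'] |tr - r| ++
      (PySem.List.pyRepeat [if tc - c ≥ 0 then 'R' else 'L'] |tc - c| ++ ['!']) := by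
  intro fuel
  induction fuel with
  | zero =>
    intro r c tr tc h
    have hr : r = tr := by omega
    have hc : c = tc := by omega
    simp [pvWalkGo, hr, hc, PySem.List.pyRepeat_singleton]
  | succ n ih =>
    intro r c tr tc h
    by_cases hr : r = tr
    · subst hr
      rw [pvGo_row (n + 1) c r tc false (by omega)]
      simp [PySem.List.pyRepeat_singleton]
    · rw [show pvWalkGo (n + 1) r c tr tc false =
          (if tr > r then 'D' else 'U') ::
            pvWalkGo n (if tr > r then r + 1 else r - 1) c tr tc false by
        simp [pvWalkGo, hr]]
      by_cases hlt : tr > r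
      · simp only [if_pos hlt]
        rw [ih (r + 1) c tr tc (by omega)]
        rw [if_pos (by omega : tr - r ≥ 0)]
        exact pvRun_succ 'D' 'U' r tr hlt _
      · have hlt' : tr < r := by omega
        simp only [if_neg hlt]
        rw [ih (r - 1) c tr tc (by omega)]
        rw [if_neg (by omega : ¬ tr - r ≥ 0)]
        exact pvRun_pred 'D' 'U' r tr hlt' _

-- 'z' walk = horizontal run ++ vertical run ++ '!'
theorem pvGo_true : ∀ (fuel : Nat) (r c tr tc : Int),
    fuel = (tr - r).natAbs + (tc - c).natAbs →
    pvWalkGo fuel r c tr tc true =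
      PySem.List.pyRepeat [if tc - c ≥ 0 then 'R' else 'L'] |tc - c| ++
      (PySem.List.pyRepeat [if tr - r ≥ 0 then 'D' else 'U'] |tr - r| ++ ['!']) := by
  intro fuel
  induction fuel with
  | zero =>
    intro r c tr tc h
    have hr : r = tr := by omega
    have hc : c = tc := by omega
    simp [pvWalkGo, hr, hc, PySem.List.pyRepeat_singleton]
  | succ n ih =>
    intro r c tr tc h
    by_cases hc : c = tc
    · subst hc
      rw [pvGo_col (n + 1) r tr c true (by omega)]
      simp [PySem.List.pyRepeat_singleton]
    · rw [show pvWalkGo (n + 1) r c tr tc true =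
          (if tc > c then 'R' else 'L') ::
            pvWalkGo n r (if tc > c then c + 1 else c - 1) tr tc true by
        simp [pvWalkGo, hc]]
      by_cases hlt : tc > c
      · simp only [if_pos hlt]
        rw [ih r (c + 1) tr tc (by omega)]
        rw [if_pos (by omega : tc - c ≥ 0)]
        exact pvRun_succ 'R' 'L' c tc hlt _
      · have hlt' : tc < c := by omega
        simp only [if_neg hlt]
        rw [ih r (c - 1) tr tc (by omega)]
        rw [if_neg (by omega : ¬ tc - c ≥ 0)]
        exact pvRun_pred 'R' 'L' c tc hlt' _

-- one step of A's loop emits exactly the walker's segment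
theorem pvStep_walk (s : Int × Int) (ch : Char)
    (hc : ch ∈ "abcdefghijklmnopqrstuvwxyz".toList) :
    (let e := (pvPosition.get? ch).getD (0, 0)
     let x := e.1 - s.1
     let y := e.2 - s.2
     let dir1 := if x ≥ 0 then 'D' else 'U'
     let dir2 := if y ≥ 0 then 'R' else 'L'
     if ch = 'z' then
        PySem.List.pyRepeat [dir2] |y| ++ PySem.List.pyRepeat [dir1] |x| ++ ['!']
      else
        PySem.List.pyRepeat [dir1] |x| ++ PySem.List.pyRepeat [dir2] |y| ++ ['!']) =
    pvWalk s.1 s.2 (pvCoord ch).1 (pvCoord ch).2 (ch == 'z') := by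
  rw [pvPosition_eq_coord ch hc]
  by_cases hz : ch = 'z'
  · have hb : (ch == 'z') = true := by simp [hz]
    rw [hb, pvWalk, pvGo_true _ s.1 s.2 _ _ rfl]
    simp [hz]
  · have hb : (ch == 'z') = false := by simp [hz]
    rw [hb, pvWalk, pvGo_false _ s.1 s.2 _ _ rfl]
    simp [hz]

-- loop invariant: A's fold from (s, acc) appends exactly B's walker segments
theorem pvFold_eq (l : List Char) :
    ∀ (s : Int × Int) (acc : List Char) (acc2 : List (List Char)),
    (∀ c ∈ l, c ∈ "abcdefghijklmnopqrstuvwxyz".toList) →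
    acc = acc2.flatten →
    (l.foldl (fun (st : (Int × Int) × List Char) letter =>
      let start := st.1
      let e := (pvPosition.get? letter).getD (0, 0)
      let x := e.1 - start.1
      let y := e.2 - start.2
      let dir1 := if x ≥ 0 then 'D' else 'U'
      let dir2 := if y ≥ 0 then 'R' else 'L'
      let seg := if letter = 'z' then
          PySem.List.pyRepeat [dir2] |y| ++ PySem.List.pyRepeat [dir1] |x| ++ ['!']
        else
          PySem.List.pyRepeat [dir1] |x| ++ PySem.List.pyRepeat [dir2] |y| ++ ['!']
      (e, st.2 ++ seg)) (s, acc)).2 =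
    ((l.foldl (fun (st : (Int × Int) × List (List Char)) ch =>
      let t := pvCoord ch
      (t, st.2 ++ [pvWalk st.1.1 st.1.2 t.1 t.2 (ch == 'z')])) (s, acc2)).2).flatten := by
  induction l with
  | nil => intro s acc acc2 _ hacc; simpa using hacc
  | cons c l ih =>
    intro s acc acc2 h hacc
    have hc := h c List.mem_cons_self
    simp only [List.foldl_cons]
    have hseg := pvStep_walk s c hc
    simp only at hseg
    rw [hseg, pvPosition_eq_coord c hc]
    simp only [Option.getD_some]
    exact ih (pvCoord c) _ _ (fun d hd => h d (List.mem_cons_of_mem _ hd))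
      (by simp [hacc])

-- ===== VERDICT (by name: the statement is the Claim_ definition above) =====
theorem alphabetBoardPath_best_memory_spec : Claim_equal_alphabetBoardPath_best_memory := by
  intro target _ hpre
  have hpre' : ∀ c ∈ target.toList, c ∈ "abcdefghijklmnopqrstuvwxyz".toList :=
    fun c hc => of_decide_eq_true (List.all_eq_true.mp hpre c hc)
  unfold Spec_alphabetBoardPath_best_memory alphabetBoardPath_best_memory
    alphabetBoardPath_best_memory_alt
  simp only []
  rw [pvFold_eq target.toList (0, 0) [] [] hpre' rfl]
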